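-- pv_equiv track=rewrite | github.com/nolzed/reikoku-en-translation | decode_ascii_table.py | convert_ascii_table
-- ===== SOURCE A (Python) =====
-- def convert_ascii_table(ascii_table, font_table, width=16):
--     result_lines = []
--     for i in range(0, len(ascii_table), width):
--         line = ''
--         for code in ascii_table[i:i+width]:
--             if code == 0x0000:
--                 line += ' '
--             else:
--                 line += font_table.get(code, '?')  # '?' for unknown mappings
--         result_lines.append(line)
--     return result_lines
-- ===== SOURCE B (Python) =====
-- def convert_ascii_table(ascii_table, font_table, width=16):
--     # Single pass with an explicit line accumulator and counter: append each
--     # glyph to the current line, flush it as a finished row every `width`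
--     # codes, and flush the final partial row after the loop.  Nonpositive
--     # width yields no rows (as range()'s empty/raising behaviour does in A).
--     if width <= 0:
--         return []
--     result, line, count = [], [], 0
--     for code in ascii_table:
--         line.append(' ' if code == 0x0000 else font_table.get(code, '?'))
--         count += 1
--         if count == width:
--             result.append(''.join(line))
--             line, count = [], 0
--     if count != 0:
--         result.append(''.join(line))
--     return result
-- ===== Notes on version B (the rewrite author's own statement) =====
-- stated objective: alternative
-- what changed: Replaces A's index-arithmetic outer loop over range(0,len,width) with per-line slicing by a single flat pass over the codes that keeps a current-line accumulator and counter, flushing a finished row every width codes and the final partial row after the loop; no slicing or index computation remains.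
import Mathlib
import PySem

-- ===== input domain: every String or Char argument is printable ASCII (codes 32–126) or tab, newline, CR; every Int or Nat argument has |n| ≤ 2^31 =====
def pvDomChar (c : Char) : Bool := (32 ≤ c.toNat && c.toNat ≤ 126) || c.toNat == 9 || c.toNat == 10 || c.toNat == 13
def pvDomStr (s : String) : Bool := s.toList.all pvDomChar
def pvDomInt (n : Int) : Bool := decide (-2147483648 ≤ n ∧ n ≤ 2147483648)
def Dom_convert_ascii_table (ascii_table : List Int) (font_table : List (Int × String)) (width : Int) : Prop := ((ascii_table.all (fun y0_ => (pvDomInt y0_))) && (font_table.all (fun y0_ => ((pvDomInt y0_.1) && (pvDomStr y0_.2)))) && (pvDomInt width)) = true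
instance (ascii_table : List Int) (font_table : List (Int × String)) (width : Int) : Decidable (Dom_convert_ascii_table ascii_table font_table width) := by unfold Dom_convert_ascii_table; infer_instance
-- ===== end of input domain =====

-- B replaces A's range/slice chunking (outer loop over start indices, inner loop per slice)
-- by ONE flat pass over the codes with a current-line accumulator and counter that flushes a
-- row every `width` codes and the final partial row after the loop; same cost, different loop structure.

-- ===== PORT A =====
-- A: outer loop over range(0, len, width); inner loop builds each line by appending glyphs.
def convert_ascii_table (ascii_table : List Int) (font_table : List (Int × String)) (width : Int) : List String :=
  let d := PySem.Dict.ofList font_table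
  (PySem.List.pyRange 0 (ascii_table.length : Int) width).foldl
    (fun result_lines i =>
      result_lines ++
        [(PySem.List.slice ascii_table (some i) (some (i + width))).foldl
          (fun line code =>
            line ++ (if code = 0 then " " else PySem.Dict.getD d code "?")) ""])
    []

-- ===== PORT B =====
-- B: guard for nonpositive width; single foldl carrying (result, current line, counter),
-- flushing a joined row when the counter reaches width, plus a final flush of a partial row.
def convert_ascii_table_alt (ascii_table : List Int) (font_table : List (Int × String)) (width : Int) : List String :=
  if width ≤ 0 then []
  else
    let d := PySem.Dict.ofList font_table
    let st := ascii_table.foldl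
      (fun (st : List String × List String × Int) code =>
        let line := st.2.1 ++ [if code = 0 then " " else PySem.Dict.getD d code "?"]
        let count := st.2.2 + 1
        if count = width then (st.1 ++ [PySem.Str.join "" line], [], 0)
        else (st.1, line, count))
      ([], [], 0)
    if st.2.2 ≠ 0 then st.1 ++ [PySem.Str.join "" st.2.1] else st.1

-- ===== PRECONDITION & SPEC =====
-- Pre_ excludes only width = 0, on which Python's range(0, len, 0) raises ValueError in A.
def Pre_convert_ascii_table (ascii_table : List Int) (font_table : List (Int × String)) (width : Int) : Prop := width ≠ 0
instance (ascii_table : List Int) (font_table : List (Int × String)) (width : Int) : Decidable (Pre_convert_ascii_table ascii_table font_table width) := by unfold Pre_convert_ascii_table; infer_instance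
def pvWitness_convert_ascii_table : List Int × (List (Int × String)) × Int := ([1, 0, 2], [(1, "A"), (2, "B")], 2)

def Spec_convert_ascii_table (ascii_table : List Int) (font_table : List (Int × String)) (width : Int) (out : List String) : Prop := out = convert_ascii_table_alt ascii_table font_table width
instance (ascii_table : List Int) (font_table : List (Int × String)) (width : Int) (out : List String) : Decidable (Spec_convert_ascii_table ascii_table font_table width out) := by unfold Spec_convert_ascii_table; infer_instance

-- ===== CLAIM (what is proved, stated in full; the proofs are below) =====
def Claim_equal_convert_ascii_table : Prop := ∀ (ascii_table : List Int) (font_table : List (Int × String)) (width : Int), Dom_convert_ascii_table ascii_table font_table width → Pre_convert_ascii_table ascii_table font_table width → Spec_convert_ascii_table ascii_table font_table width (convert_ascii_table ascii_table font_table width)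

-- ===== LEMMAS AND PROOFS =====

-- Reference chunking (fuel = list length), shared characterisation of both programs.
def pvGo (w : Nat) : Nat → List Int → List (List Int)
  | _, [] => []
  | 0, _ :: _ => []
  | f + 1, x :: t => (x :: t).take w :: pvGo w f ((x :: t).drop w)

def pvChunks (w : Nat) (xs : List Int) : List (List Int) := pvGo w xs.length xs

theorem pvGo_fuel (w : Nat) (hw : 0 < w) :
    ∀ f1 f2 ys, ys.length ≤ f1 → ys.length ≤ f2 → pvGo w f1 ys = pvGo w f2 ys := by
  intro f1
  induction f1 with
  | zero =>
    intro f2 ys h1 _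
    cases ys with
    | nil => cases f2 <;> rfl
    | cons y t => simp at h1
  | succ f1 ih =>
    intro f2 ys h1 h2
    cases ys with
    | nil => cases f2 <;> rfl
    | cons y t =>
      cases f2 with
      | zero => simp at h2
      | succ f2 =>
        simp only [pvGo]
        congr 1
        apply ih
        · simp at h1 ⊢; omega
        · simp at h2 ⊢; omega

theorem pvChunks_cons (w : Nat) (hw : 0 < w) (xs : List Int) (h : xs ≠ []) :
    pvChunks w xs = xs.take w :: pvChunks w (xs.drop w) := by
  cases xs with
  | nil => exact absurd rfl h
  | cons x t =>
    simp only [pvChunks, List.length_cons, pvGo]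
    congr 1
    exact pvGo_fuel w hw t.length _ _ (by simp; omega) le_rfl

-- range with positive step, unfolded one element.
theorem pv_pyRange_pos_cons (a b s : Int) (hs : 0 < s) (h : a < b) :
    PySem.List.pyRange a b s = a :: PySem.List.pyRange (a + s) b s := by
  rw [PySem.List.pyRange_of_pos a b hs, PySem.List.pyRange_of_pos (a + s) b hs]
  by_cases h2 : a + s < b
  · have e1 : b - a + s - 1 = (b - (a + s) + s - 1) + 1 * s := by ring
    have e2 : 0 ≤ (b - (a + s) + s - 1) / s :=
      Int.ediv_nonneg (by omega) (by omega)
    rw [if_pos h, if_pos h2, e1, Int.add_mul_ediv_right _ _ (by omega)]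
    rw [show ((b - (a + s) + s - 1) / s + 1).toNat
        = ((b - (a + s) + s - 1) / s).toNat + 1 by omega]
    rw [List.range_succ_eq_map]
    simp only [List.map_cons, List.map_map]
    refine List.cons_eq_cons.mpr ⟨by simp, ?_⟩
    apply List.map_congr_left
    intro k _
    simp [Function.comp]
    ring_nf
  · have e1 : b - a + s - 1 = (b - a - 1) + 1 * s := by ring
    rw [if_pos h, if_neg h2, e1, Int.add_mul_ediv_right _ _ (by omega),
        Int.ediv_eq_zero_of_lt (by omega) (by omega)]
    simp

theorem pv_pyRange_pos_nil (a b s : Int) (hs : 0 < s) (h : b ≤ a) :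
    PySem.List.pyRange a b s = [] := by
  rw [PySem.List.pyRange_of_pos a b hs, if_neg (by omega)]
  simp

-- shifting a positive-step range by one step
theorem pv_pyRange_shift {β : Type} (a b s : Int) (hs : 0 < s) (F : Int → β) :
    (PySem.List.pyRange (a + s) b s).map F
      = (PySem.List.pyRange a (b - s) s).map (fun i => F (i + s)) := by
  rw [PySem.List.pyRange_of_pos (a + s) b hs, PySem.List.pyRange_of_pos a (b - s) hs]
  by_cases hc : a < b - s
  · rw [if_pos (show a + s < b by omega), if_pos hc,
        show b - (a + s) + s - 1 = b - s - a + s - 1 by ring]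
    simp only [List.map_map]
    apply List.map_congr_left
    intro k _
    simp [Function.comp]
    ring_nf
  · rw [if_neg (show ¬ a + s < b by omega), if_neg hc]
    simp

-- A's outer map over start indices equals the reference chunking.
theorem pv_A_chunks {β : Type} (w : Int) (hw : 0 < w) (g' : List Int → β) :
    ∀ (N : Nat) (xs : List Int), xs.length ≤ N →
      (PySem.List.pyRange 0 (xs.length : Int) w).map
          (fun i => g' (PySem.List.slice xs (some i) (some (i + w))))
        = (pvChunks w.toNat xs).map g' := by
  intro N
  induction N with
  | zero =>
    intro xs h
    have : xs = [] := List.eq_nil_of_length_eq_zero (by omega)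
    subst this
    simp [pvChunks, pvGo, pv_pyRange_pos_nil 0 0 w hw le_rfl]
  | succ N ih =>
    intro xs h
    by_cases hnil : xs = []
    · subst hnil
      simp [pvChunks, pvGo, pv_pyRange_pos_nil 0 0 w hw le_rfl]
    · have hlen : 0 < xs.length := List.length_pos_of_ne_nil hnil
      rw [pv_pyRange_pos_cons 0 (xs.length : Int) w hw (by exact_mod_cast hlen),
          pvChunks_cons w.toNat (by omega) xs hnil]
      simp only [List.map_cons]
      refine List.cons_eq_cons.mpr ⟨?_, ?_⟩
      · rw [PySem.List.slice_toNat xs (by omega) (by omega)]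
        simp
      · rw [pv_pyRange_shift 0 (xs.length : Int) w hw]
        by_cases hcase : w ≤ (xs.length : Int)
        · have hdl : ((xs.drop w.toNat).length : Int) = (xs.length : Int) - w := by
            simp; omega
          rw [show (xs.length : Int) - w = ((xs.drop w.toNat).length : Int) from hdl.symm,
            ← ih (xs.drop w.toNat) (by simp; omega)]
          apply List.map_congr_left
          intro i hi
          have hi0 : 0 ≤ i := by
            have := (PySem.List.mem_pyRange_iff_of_pos hw i).1 hi
            omega
          congr 1
          rw [PySem.List.slice_toNat xs (by omega) (by omega),
              PySem.List.slice_toNat (xs.drop w.toNat) (by omega) (by omega),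
              List.drop_drop,
              show (i + w + w).toNat - (i + w).toNat = (i + w).toNat - i.toNat by omega,
              show (i + w).toNat = i.toNat + w.toNat by omega,
              Nat.add_comm i.toNat w.toNat]
        · -- width longer than the list: both tails are empty
          have h1 : PySem.List.pyRange 0 ((xs.length : Int) - w) w = [] :=
            pv_pyRange_pos_nil _ _ _ hw (by omega)
          have h2 : xs.drop w.toNat = [] := by
            apply List.drop_eq_nil_of_le; omega
          rw [h1, h2]
          simp [pvChunks, pvGo]

-- joining with the empty separator is flattening.
theorem pv_join_nil (l : List (List Char)) :
    PySem.Chars.join [] l = l.flatten := by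
  induction l with
  | nil => simp [PySem.Chars.join, List.intercalate]
  | cons x t ih =>
    cases t with
    | nil => simp [PySem.Chars.join, List.intercalate]
    | cons y u =>
      simp only [PySem.Chars.join, List.intercalate] at ih ⊢
      simp [List.intersperse_cons₂, ih]

-- A's inner string fold, seen through toList.
theorem pv_fold_toList (chunk : List Int) (g : Int → String) (acc : String) :
    (chunk.foldl (fun line code => line ++ g code) acc).toList
      = acc.toList ++ (chunk.map (fun c => (g c).toList)).flatten := by
  induction chunk generalizing acc with
  | nil => simp
  | cons c t ih => simp [List.foldl_cons, ih, String.toList_append]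

theorem pv_inner_eq (chunk : List Int) (g : Int → String) :
    chunk.foldl (fun line code => line ++ g code) ""
      = PySem.Str.join "" (chunk.map g) := by
  apply String.toList_injective
  rw [pv_fold_toList, PySem.Str.toList_join,
      show ("" : String).toList = [] from rfl, pv_join_nil]
  simp [List.map_map, Function.comp_def]

-- B's flat fold with counter and flushes equals the reference chunking.
theorem pv_B_go (w : Int) (hw : 0 < w) (g : Int → String) :
    ∀ (xs pref : List Int) (res : List String), (pref.length : Int) < w →
      (let st := xs.foldl
          (fun (st : List String × List String × Int) code =>
            if st.2.2 + 1 = w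
            then (st.1 ++ [PySem.Str.join "" (st.2.1 ++ [g code])], [], 0)
            else (st.1, st.2.1 ++ [g code], st.2.2 + 1))
          (res, pref.map g, (pref.length : Int));
        if st.2.2 ≠ 0 then st.1 ++ [PySem.Str.join "" st.2.1] else st.1)
      = res ++ (pvChunks w.toNat (pref ++ xs)).map (fun ch => PySem.Str.join "" (ch.map g)) := by
  intro xs
  induction xs with
  | nil =>
    intro pref res hp
    by_cases hpn : pref = []
    · subst hpn
      simp [pvChunks, pvGo]
    · have hlen : 0 < pref.length := List.length_pos_of_ne_nil hpn
      simp only [List.foldl_nil, List.append_nil]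
      rw [if_pos (show ((pref.length : Int)) ≠ 0 by omega)]
      rw [pvChunks_cons w.toNat (by omega) pref hpn,
          List.take_of_length_le (by omega), List.drop_eq_nil_of_le (by omega)]
      simp [pvChunks, pvGo]
  | cons c t ih =>
    intro pref res hp
    simp only [List.foldl_cons]
    by_cases hfull : (pref.length : Int) + 1 = w
    · simp only [if_pos hfull]
      have h0 : ((([] : List Int)).length : Int) < w := by simpa using hw
      have := ih [] (res ++ [PySem.Str.join "" (pref.map g ++ [g c])]) h0
      simp only [List.map_nil, List.length_nil, Nat.cast_zero, List.nil_append] at this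
      rw [this]
      have hne : (pref ++ c :: t) ≠ [] := by simp
      rw [pvChunks_cons w.toNat (by omega) _ hne]
      have e : pref ++ c :: t = (pref ++ [c]) ++ t := by simp
      have hl : (pref ++ [c]).length = w.toNat := by simp; omega
      have ht : (pref ++ c :: t).take w.toNat = pref ++ [c] := by
        rw [e, ← hl, List.take_left]
      have hd : (pref ++ c :: t).drop w.toNat = t := by
        rw [e, ← hl, List.drop_left]
      rw [ht, hd]
      simp
    · simp only [if_neg hfull]
      have hlt : (((pref ++ [c]).length : Int)) < w := by simp; omega
      have := ih (pref ++ [c]) res hlt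
      rw [show ((pref ++ [c]).map g) = pref.map g ++ [g c] by simp,
          show (((pref ++ [c]).length : Int)) = (pref.length : Int) + 1 by simp] at this
      rw [this]
      simp

-- The B port, characterised through the reference chunking (0 < width).
theorem pv_B_eq_chunks (ascii_table : List Int) (font_table : List (Int × String))
    (width : Int) (hw : 0 < width) :
    convert_ascii_table_alt ascii_table font_table width
      = (pvChunks width.toNat ascii_table).map
          (fun ch => PySem.Str.join ""
            (ch.map (fun code => if code = 0 then " "
              else PySem.Dict.getD (PySem.Dict.ofList font_table) code "?"))) := by
  have h := pv_B_go width hw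
    (fun code => if code = 0 then " "
      else PySem.Dict.getD (PySem.Dict.ofList font_table) code "?")
    ascii_table [] [] (by simpa using hw)
  simp only [List.map_nil, List.length_nil, Nat.cast_zero, List.nil_append] at h
  unfold convert_ascii_table_alt
  rw [if_neg (by omega)]
  exact h

-- ===== VERDICT (by name: the statement is the Claim_ definition above) =====
theorem convert_ascii_table_spec : Claim_equal_convert_ascii_table := by
  intro ascii_table font_table width _ hpre
  unfold Pre_convert_ascii_table at hpre
  unfold Spec_convert_ascii_table convert_ascii_table
  by_cases hw : width ≤ 0
  · -- width < 0: A's range is empty; B's guard yields no rows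
    have hr : PySem.List.pyRange 0 (ascii_table.length : Int) width = [] := by
      simp only [PySem.List.pyRange, if_neg hpre]
      rw [if_neg (by omega), if_neg (by omega)]
      simp
    rw [hr]
    unfold convert_ascii_table_alt
    rw [if_pos hw]
    rfl
  · have hw' : 0 < width := by omega
    rw [PySem.List.foldl_append_singleton_eq_map]
    simp only [List.nil_append]
    rw [pv_A_chunks width hw'
        (fun ch => ch.foldl (fun line code => line ++ (if code = 0 then " "
          else PySem.Dict.getD (PySem.Dict.ofList font_table) code "?")) "")
        ascii_table.length ascii_table le_rfl,
      pv_B_eq_chunks ascii_table font_table width hw']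
    apply List.map_congr_left
    intro ch _
    exact pv_inner_eq ch _
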